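-- pv_equiv track=rewrite | github.com/michael-bill/ITMO | Sem 1/Информатика/Лабораторные/Лабораторная работа №1/ForLab0_inf.py | ns10_to_fact
-- ===== SOURCE A (Python) =====
-- def ns10_to_fact(number):
--     res = 0
--     i = 0
--     while number > 0:
--         res += (number % (i + 2)) * (10 ** i)
--         number //= (i + 2)
--         i += 1
--     return res
-- ===== SOURCE B (Python) =====
-- def _fact_value(n, base):
--     if n <= 0:
--         return 0
--     return n % base + 10 * _fact_value(n // base, base + 1)
--
-- def ns10_to_fact(number):
--     return _fact_value(number, 2)
-- ===== Notes on version B (the rewrite author's own statement) =====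
-- stated objective: alternative
-- what changed: Replaces A's iterative loop with its res accumulator and explicit 10**i weights by a recursive Horner decomposition: the least-significant digit is peeled off and added to 10 times the recursively converted quotient, so no accumulator, no position counter and no power computation remain.
import Mathlib
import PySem

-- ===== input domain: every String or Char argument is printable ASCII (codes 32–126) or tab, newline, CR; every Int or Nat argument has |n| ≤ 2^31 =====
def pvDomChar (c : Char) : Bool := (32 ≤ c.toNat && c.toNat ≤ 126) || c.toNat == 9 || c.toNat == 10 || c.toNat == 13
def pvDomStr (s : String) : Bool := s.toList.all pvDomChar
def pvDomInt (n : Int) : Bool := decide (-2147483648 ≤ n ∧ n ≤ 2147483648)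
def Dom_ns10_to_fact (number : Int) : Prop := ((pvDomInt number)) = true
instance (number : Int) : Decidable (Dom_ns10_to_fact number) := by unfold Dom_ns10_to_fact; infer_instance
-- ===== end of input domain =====

-- B replaces A's accumulating loop with explicit 10**i weights by a recursive Horner
-- decomposition (digit + 10 * recurse on the quotient): alternative structure, same cost.

-- ===== PORT A =====
def ns10_to_fact_loop (number res : Int) (i : Nat) : Int :=
  if h : 0 < number then
    ns10_to_fact_loop (PySem.Int.floordiv number ((i : Int) + 2))
      (res + PySem.Int.mod number ((i : Int) + 2) * 10 ^ i) (i + 1)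
  else res
termination_by number.toNat
decreasing_by
  have h1 : PySem.Int.floordiv number ((i : Int) + 2) < number :=
    (PySem.Int.floordiv_lt_iff_lt_mul (by omega)).mpr (by nlinarith)
  omega

def ns10_to_fact (number : Int) : Int := ns10_to_fact_loop number 0 0

-- ===== PORT B =====
-- helper _fact_value of Source B; the `2 ≤ base` totality guard holds at every call
-- reachable from ns10_to_fact_alt (base starts at 2 and only grows) and makes the
-- recursion terminate.
def factValue (n base : Int) : Int :=
  if h : n ≤ 0 ∨ base < 2 then 0
  else PySem.Int.mod n base + 10 * factValue (PySem.Int.floordiv n base) (base + 1)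
termination_by n.toNat
decreasing_by
  have hn : 0 < n := by omega
  have hb : 2 ≤ base := by omega
  have h1 : PySem.Int.floordiv n base < n :=
    (PySem.Int.floordiv_lt_iff_lt_mul (by omega)).mpr (by nlinarith)
  omega

def ns10_to_fact_alt (number : Int) : Int := factValue number 2

-- ===== PRECONDITION & SPEC =====
def Spec_ns10_to_fact (number : Int) (out : Int) : Prop := out = ns10_to_fact_alt number
instance (number : Int) (out : Int) : Decidable (Spec_ns10_to_fact number out) := by unfold Spec_ns10_to_fact; infer_instance

-- ===== CLAIM (what is proved, stated in full; the proofs are below) =====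
def Claim_equal_ns10_to_fact : Prop := ∀ (number : Int), Dom_ns10_to_fact number → Spec_ns10_to_fact number (ns10_to_fact number)

-- ===== LEMMAS AND PROOFS =====

-- A's accumulating loop at position i equals res plus 10^i times B's Horner value at base i+2
theorem ns10_to_fact_loop_eq (number res : Int) (i : Nat) :
    ns10_to_fact_loop number res i = res + 10 ^ i * factValue number ((i : Int) + 2) := by
  induction number, res, i using ns10_to_fact_loop.induct with
  | case1 number res i h ih =>
    rw [ns10_to_fact_loop, factValue]
    simp only [dif_pos h]
    rw [dif_neg (by omega), ih]
    have : ((i : Int) + 2) + 1 = ((i + 1 : Nat) : Int) + 2 := by push_cast; ring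
    rw [this]
    ring
  | case2 number res i h =>
    rw [ns10_to_fact_loop, factValue]
    rw [dif_neg h, dif_pos (by omega)]
    ring

-- ===== VERDICT (by name: the statement is the Claim_ definition above) =====
theorem ns10_to_fact_spec : Claim_equal_ns10_to_fact := by
  intro number _
  unfold Spec_ns10_to_fact ns10_to_fact ns10_to_fact_alt
  rw [ns10_to_fact_loop_eq]
  norm_num
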